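-- pv_equiv track=rewrite | github.com/louisuxu-sys/BC-LINE | sv94.py | _derived_road
-- ===== SOURCE A (Python) =====
-- def _derived_road(big_road_cols, gap):
--     # gap=1: 大眼仔路, gap=2: 小路, gap=3: 蟑螂路
--     # 大眼仔: start col2 row2 (1-idx), fallback col3 row1
--     # 小路:   start col3 row2 (1-idx), fallback col4 row1
--     # 蟑螂路: start col4 row2 (1-idx), fallback col5 row1
--     # 和局不計入 (big_road_cols already excludes 和)
--     results = []
--     n = len(big_road_cols)
--     # Determine starting point (convert 1-indexed to 0-indexed)
--     primary_col = gap      # col (gap+1) in 1-idx = col gap in 0-idx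
--     primary_row = 1        # row 2 in 1-idx = row 1 in 0-idx
--     fallback_col = gap + 1 # col (gap+2) in 1-idx = col (gap+1) in 0-idx
--     fallback_row = 0       # row 1 in 1-idx = row 0 in 0-idx
--     if primary_col < n and len(big_road_cols[primary_col]) >= 2:
--         start_ci, start_ri = primary_col, primary_row
--     elif fallback_col < n:
--         start_ci, start_ri = fallback_col, fallback_row
--     else:
--         return results
--     # Iterate through big road positions from start point
--     started = False
--     for ci in range(n):
--         for ri in range(len(big_road_cols[ci])):
--             if not started:
--                 if ci == start_ci and ri == start_ri:
--                     started = True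
--                 else:
--                     continue
--             # Judgment
--             if ri == 0:
--                 # 齊整: compare col(ci-1) length vs col(ci-1-gap) length
--                 prev_ci = ci - 1
--                 compare_ci = ci - 1 - gap
--                 if prev_ci < 0 or compare_ci < 0:
--                     continue
--                 results.append("R" if len(big_road_cols[prev_ci]) == len(big_road_cols[compare_ci]) else "B")
--             else:
--                 # 直落: move gap left, compare current row with row above
--                 # (ci-gap, ri) exists? AND (ci-gap, ri-1) exists?
--                 # Same state (both exist or both don't) = Red, different = Blue
--                 ref_ci = ci - gap
--                 if ref_ci < 0:
--                     continue
--                 ref_len = len(big_road_cols[ref_ci])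
--                 cur_exists = ri < ref_len
--                 above_exists = (ri - 1) < ref_len
--                 results.append("R" if cur_exists == above_exists else "B")
--     return results
-- ===== SOURCE B (Python) =====
-- def _derived_road(big_road_cols, gap):
--     # Staged, column-at-a-time computation: each big-road column contributes a
--     # closed-form symbol block (one head symbol, then a run of "R"s with at most
--     # one "B" where the row index equals the reference column's length), instead
--     # of judging every cell individually with a started-flag.
--     lens = [len(c) for c in big_road_cols]
--     n = len(lens)
--     if gap < n and lens[gap] >= 2:
--         sci = gap            # primary start: col gap, row 1 (0-indexed)
--     elif gap + 1 < n and lens[gap + 1] >= 1: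
--         sci = gap + 1        # fallback start: col gap+1, row 0
--     else:
--         return []            # no start position materializes
--     out = []
--     for ci in range(sci, n):
--         L = lens[ci]
--         # head symbol (row 0): 齊整 comparison; absent for the primary start
--         # column automatically, since ci-1-gap = -1 there.
--         if L >= 1 and ci - 1 - gap >= 0:
--             out.append("R" if lens[ci - 1] == lens[ci - 1 - gap] else "B")
--         # rows 1..L-1: 直落 — the pair-of-existence test yields "B" exactly at
--         # the row equal to len(col ci-gap), "R" everywhere else.
--         if L > 1 and ci - gap >= 0:
--             tail = ["R"] * (L - 1)
--             ref = lens[ci - gap]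
--             if 1 <= ref <= L - 1:
--                 tail[ref - 1] = "B"
--             out.extend(tail)
--     return out
-- ===== Notes on version B (the rewrite author's own statement) =====
-- stated objective: alternative
-- what changed: B works column-at-a-time in closed form: each big-road column contributes one head symbol plus a run of 'R's with at most one 'B' placed where the row index equals the reference column's length, concatenated from the start column onward, instead of A's per-cell existence comparisons guarded by a started-flag.
-- outside the precondition, e.g. on _derived_road([[1], [1]], -1): A returns ['R'], B returns ['R', 'R']
import Mathlib
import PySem

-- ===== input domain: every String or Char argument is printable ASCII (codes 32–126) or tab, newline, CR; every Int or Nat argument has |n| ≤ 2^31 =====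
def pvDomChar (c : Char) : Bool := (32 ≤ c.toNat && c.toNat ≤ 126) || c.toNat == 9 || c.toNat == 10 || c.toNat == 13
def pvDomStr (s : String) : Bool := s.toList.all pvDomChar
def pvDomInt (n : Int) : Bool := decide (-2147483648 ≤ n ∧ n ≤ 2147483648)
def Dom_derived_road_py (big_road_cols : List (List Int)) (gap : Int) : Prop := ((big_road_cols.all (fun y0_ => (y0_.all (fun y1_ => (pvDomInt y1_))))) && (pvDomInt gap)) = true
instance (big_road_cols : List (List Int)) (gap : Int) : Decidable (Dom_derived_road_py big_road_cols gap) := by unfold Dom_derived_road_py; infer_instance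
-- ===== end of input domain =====

-- B replaces A's per-cell judgments behind a 'started' flag by a column-at-a-time closed form:
-- each column contributes a head symbol plus a run of "R"s with at most one "B" (objective: alternative).


-- ===== PORT A =====
-- body of A's inner loop after the start test: the judgment on cell (ci, ri); [] = 'continue'
def pvJudgeA (big_road_cols : List (List Int)) (gap : Int) (ci ri : Int) : List String :=
  if ri = 0 then
    -- 齊整: compare col(ci-1) length vs col(ci-1-gap) length
    let prev_ci := ci - 1
    let compare_ci := ci - 1 - gap
    if prev_ci < 0 ∨ compare_ci < 0 then []
    else [if ((PySem.List.pyGetD big_road_cols prev_ci []).length : Int) =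
             ((PySem.List.pyGetD big_road_cols compare_ci []).length : Int) then "R" else "B"]
  else
    -- 直落
    let ref_ci := ci - gap
    if ref_ci < 0 then []
    else
      let ref_len : Int := ((PySem.List.pyGetD big_road_cols ref_ci []).length : Int)
      [if (decide (ri < ref_len)) = (decide (ri - 1 < ref_len)) then "R" else "B"]

-- one iteration of A's loop body, carrying the 'started' flag and the results list
def pvStepA (big_road_cols : List (List Int)) (gap sci sri : Int)
    (st : Bool × List String) (ci ri : Int) : Bool × List String :=
  if st.1 = false ∧ ¬ (ci = sci ∧ ri = sri) then st  -- 'continue' before the start cell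
  else (true, st.2 ++ pvJudgeA big_road_cols gap ci ri)

def derived_road_py (big_road_cols : List (List Int)) (gap : Int) : List String :=
  let n : Int := big_road_cols.length
  let primary_col := gap
  let fallback_col := gap + 1
  let start? : Option (Int × Int) :=
    if primary_col < n ∧ 2 ≤ ((PySem.List.pyGetD big_road_cols primary_col []).length : Int) then
      some (primary_col, 1)
    else if fallback_col < n then some (fallback_col, 0)
    else none
  match start? with
  | none => []
  | some (sci, sri) =>
    ((List.range big_road_cols.length).foldl
      (fun st ci =>
        (List.range (big_road_cols.getD ci []).length).foldl
          (fun st (ri : Nat) => pvStepA big_road_cols gap sci sri st (ci : Int) (ri : Int)) st)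
      (false, [])).2

-- ===== PORT B =====
-- the symbol block one column contributes: head ('齊整') symbol, then rows 1..L-1 as
-- a run of "R"s with at most one "B" at row = len(col ci-gap)
def pvColB (lens : List Int) (gap ci : Int) : List String :=
  let L := PySem.List.pyGetD lens ci 0
  (if 1 ≤ L ∧ 0 ≤ ci - 1 - gap then
     [if PySem.List.pyGetD lens (ci - 1) 0 = PySem.List.pyGetD lens (ci - 1 - gap) 0
      then "R" else "B"]
   else []) ++
  (if 1 < L ∧ 0 ≤ ci - gap then
     (let ref := PySem.List.pyGetD lens (ci - gap) 0
      if 1 ≤ ref ∧ ref ≤ L - 1 then (List.replicate (L - 1).toNat "R").set (ref - 1).toNat "B"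
      else List.replicate (L - 1).toNat "R")
   else [])

def derived_road_py_alt (big_road_cols : List (List Int)) (gap : Int) : List String :=
  let lens : List Int := big_road_cols.map (fun c => (c.length : Int))
  let n : Int := lens.length
  let sci? : Option Int :=
    if gap < n ∧ 2 ≤ PySem.List.pyGetD lens gap 0 then some gap
    else if gap + 1 < n ∧ 1 ≤ PySem.List.pyGetD lens (gap + 1) 0 then some (gap + 1)
    else none
  match sci? with
  | none => []
  | some sci => (PySem.List.pyRange sci n 1).foldl (fun out ci => out ++ pvColB lens gap ci) []

-- ===== PRECONDITION & SPEC =====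
-- Pre_ restricts to the function's natural domain gap ≥ 0 (it is only meaningful for gap ∈ {1,2,3}):
-- on negative gap A wraps negative indices into big_road_cols or raises IndexError on out-of-range
-- reference columns, an artefact of Python indexing.
def Pre_derived_road_py (big_road_cols : List (List Int)) (gap : Int) : Prop := 0 ≤ gap
instance (big_road_cols : List (List Int)) (gap : Int) : Decidable (Pre_derived_road_py big_road_cols gap) := by unfold Pre_derived_road_py; infer_instance
def pvWitness_derived_road_py : List (List Int) × Int := ([[1, 1], [2, 2], [1]], 1)
def Spec_derived_road_py (big_road_cols : List (List Int)) (gap : Int) (out : List String) : Prop := out = derived_road_py_alt big_road_cols gap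
instance (big_road_cols : List (List Int)) (gap : Int) (out : List String) : Decidable (Spec_derived_road_py big_road_cols gap out) := by unfold Spec_derived_road_py; infer_instance

-- ===== CLAIM (what is proved, stated in full; the proofs are below) =====
def Claim_equal_derived_road_py : Prop := ∀ (big_road_cols : List (List Int)) (gap : Int), Dom_derived_road_py big_road_cols gap → Pre_derived_road_py big_road_cols gap → Spec_derived_road_py big_road_cols gap (derived_road_py big_road_cols gap)

-- ===== LEMMAS AND PROOFS =====

-- lens is the length table of the columns (Int index)
theorem pv_lens_getD (cols : List (List Int)) (i : Int) :
    PySem.List.pyGetD (cols.map (fun c => (c.length : Int))) i 0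
      = ((PySem.List.pyGetD cols i []).length : Int) :=
  PySem.List.pyGetD_map (fun c => (c.length : Int)) cols i []

-- A's inner fold skips every row that is not the start cell
theorem pv_rows_skip (cols : List (List Int)) (gap sci sri : Int) (ci : Nat)
    (rows : List Nat) (acc : List String)
    (h : ∀ ri ∈ rows, ¬ ((ci : Int) = sci ∧ (ri : Int) = sri)) :
    rows.foldl (fun st (ri : Nat) => pvStepA cols gap sci sri st (ci : Int) (ri : Int)) (false, acc)
      = (false, acc) := by
  induction rows with
  | nil => rfl
  | cons r t ih =>
    have h0 := h r List.mem_cons_self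
    have hstep : pvStepA cols gap sci sri (false, acc) (ci : Int) (r : Int) = (false, acc) := by
      unfold pvStepA; simp [h0]
    simp only [List.foldl_cons, hstep]
    exact ih (fun ri hm => h ri (List.mem_cons_of_mem _ hm))

-- once started, A's inner fold appends the judgments of the remaining rows
theorem pv_rows_started (cols : List (List Int)) (gap sci sri : Int) (ci : Nat)
    (rows : List Nat) (acc : List String) :
    rows.foldl (fun st (ri : Nat) => pvStepA cols gap sci sri st (ci : Int) (ri : Int)) (true, acc)
      = (true, acc ++ rows.flatMap (fun (ri : Nat) => pvJudgeA cols gap (ci : Int) (ri : Int))) := by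
  induction rows generalizing acc with
  | nil => simp
  | cons r t ih =>
    have hstep : pvStepA cols gap sci sri (true, acc) (ci : Int) (r : Int)
        = (true, acc ++ pvJudgeA cols gap (ci : Int) (r : Int)) := by
      unfold pvStepA; simp
    simp only [List.foldl_cons, hstep, ih, List.flatMap_cons, List.append_assoc]

-- A's outer fold stays unstarted over columns that are not the start column
-- (or whose start column is empty, so the start cell never materializes)
theorem pv_cols_skip (cols : List (List Int)) (gap sci sri : Int)
    (cis : List Nat) (acc : List String)
    (h : ∀ ci ∈ cis, (ci : Int) = sci → (cols.getD ci []).length = 0) :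
    cis.foldl
      (fun st ci =>
        (List.range (cols.getD ci []).length).foldl
          (fun st (ri : Nat) => pvStepA cols gap sci sri st (ci : Int) (ri : Int)) st)
      (false, acc) = (false, acc) := by
  induction cis with
  | nil => rfl
  | cons c t ih =>
    by_cases hce : (c : Int) = sci
    · have hlen := h c List.mem_cons_self hce
      simp only [List.foldl_cons, hlen, List.range_zero, List.foldl_nil]
      exact ih (fun ci hm => h ci (List.mem_cons_of_mem _ hm))
    · simp only [List.foldl_cons,
        pv_rows_skip cols gap sci sri c _ acc (fun ri _ hx => hce hx.1)]
      exact ih (fun ci hm => h ci (List.mem_cons_of_mem _ hm))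

-- once started, A's outer fold appends each remaining column's judgments
theorem pv_cols_started (cols : List (List Int)) (gap sci sri : Int)
    (cis : List Nat) (acc : List String) :
    cis.foldl
      (fun st ci =>
        (List.range (cols.getD ci []).length).foldl
          (fun st (ri : Nat) => pvStepA cols gap sci sri st (ci : Int) (ri : Int)) st)
      (true, acc)
    = (true, acc ++ cis.flatMap (fun ci =>
        (List.range (cols.getD ci []).length).flatMap
          (fun (ri : Nat) => pvJudgeA cols gap (ci : Int) (ri : Int)))) := by
  induction cis generalizing acc with
  | nil => simp
  | cons c t ih =>
    simp only [List.foldl_cons, pv_rows_started, ih, List.flatMap_cons, List.append_assoc]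

-- the '直落' judgment is "B" exactly at the row equal to the reference column's length
theorem pv_judge_pos (cols : List (List Int)) (gap : Int) (ci ri : Nat) (hri : 1 ≤ ri) :
    pvJudgeA cols gap (ci : Int) (ri : Int)
      = if 0 ≤ (ci : Int) - gap then
          [if (ri : Int) = ((PySem.List.pyGetD cols ((ci : Int) - gap) []).length : Int)
           then "B" else "R"]
        else [] := by
  unfold pvJudgeA
  have h0 : ¬ ((ri : Int) = 0) := by omega
  simp only [h0, if_false]
  set ref := ((PySem.List.pyGetD cols ((ci : Int) - gap) []).length : Int) with href
  by_cases hc : (ci : Int) - gap < 0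
  · simp [hc]; omega
  · have hc' : 0 ≤ (ci : Int) - gap := by omega
    simp only [hc, if_pos hc']
    by_cases he : (ri : Int) = ref
    · simp [he]
    · have : decide ((ri : Int) < ref) = decide ((ri : Int) - 1 < ref) := by
        rcases lt_or_gt_of_ne he with h | h
        · simp; omega
        · simp; omega
      simp [this, he]

-- the tail rows 1..m of a column, mapped by the '直落' rule, are a run of "R"s with
-- at most one "B" at row = ref
theorem pv_tail_closed (m : Nat) (ref : Int) :
    (List.range' 1 m).map (fun (ri : Nat) => if (ri : Int) = ref then "B" else "R")
      = if 1 ≤ ref ∧ ref ≤ (m : Int) then (List.replicate m "R").set (ref - 1).toNat "B"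
        else List.replicate m "R" := by
  by_cases hc : 1 ≤ ref ∧ ref ≤ (m : Int)
  · rw [if_pos hc]
    apply List.ext_getElem
    · simp
    · intro j h1 h2
      have hj : j < m := by simpa using h1
      rw [List.getElem_map, List.getElem_range', List.getElem_set]
      simp only [List.getElem_replicate]
      by_cases he : (ref - 1).toNat = j
      · rw [if_pos he, if_pos (show ((1 + 1 * j : Nat) : Int) = ref by omega)]
      · rw [if_neg he, if_neg (show ¬ ((1 + 1 * j : Nat) : Int) = ref by omega)]
  · rw [if_neg hc]
    apply List.ext_getElem
    · simp
    · intro j h1 h2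
      have hj : j < m := by simpa using h1
      rw [List.getElem_map, List.getElem_range', List.getElem_replicate,
        if_neg (show ¬ ((1 + 1 * j : Nat) : Int) = ref by omega)]

-- one column's flat judgments equal B's closed-form block (nonnegative gap)
theorem pv_col_eq (cols : List (List Int)) (gap : Int) (hg : 0 ≤ gap) (ci : Nat) :
    (List.range (cols.getD ci []).length).flatMap
        (fun (ri : Nat) => pvJudgeA cols gap (ci : Int) (ri : Int))
      = pvColB (cols.map (fun c => (c.length : Int))) gap (ci : Int) := by
  have hLD : (PySem.List.pyGetD cols (ci : Int) []) = cols.getD ci [] := by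
    simp [PySem.List.pyGetD_natCast]
  unfold pvColB
  simp only [pv_lens_getD, hLD]
  by_cases h0 : (cols.getD ci []).length = 0
  · rw [h0]
    simp
  · have hpos : 0 < (cols.getD ci []).length := Nat.pos_of_ne_zero h0
    have hr : List.range (cols.getD ci []).length
        = 0 :: List.range' 1 ((cols.getD ci []).length - 1) := by
      rw [List.range_eq_range']
      rcases Nat.exists_eq_add_of_lt hpos with ⟨k, hk⟩
      rw [show (cols.getD ci []).length = k + 1 by omega, List.range'_succ]
      simp
    rw [hr, List.flatMap_cons]
    congr 1
    · -- head: row 0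
      unfold pvJudgeA
      simp only [Nat.cast_zero]
      by_cases hh : 0 ≤ (ci : Int) - 1 - gap
      · have h1 : ¬ ((ci : Int) - 1 < 0 ∨ (ci : Int) - 1 - gap < 0) := by omega
        have h2 : 1 ≤ ((cols.getD ci []).length : Int) ∧ 0 ≤ (ci : Int) - 1 - gap :=
          ⟨by omega, hh⟩
        rw [if_neg h1, if_pos h2]
        simp
      · have h1 : (ci : Int) - 1 < 0 ∨ (ci : Int) - 1 - gap < 0 := by omega
        have h2 : ¬ (1 ≤ ((cols.getD ci []).length : Int) ∧ 0 ≤ (ci : Int) - 1 - gap) := by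
          omega
        rw [if_pos h1, if_neg h2]
        simp
    · -- tail: rows 1..L-1
      by_cases hc : 0 ≤ (ci : Int) - gap
      · have hmap : ∀ ri ∈ List.range' 1 ((cols.getD ci []).length - 1),
            pvJudgeA cols gap (ci : Int) (ri : Int)
              = [if (ri : Int) = ((PySem.List.pyGetD cols ((ci : Int) - gap) []).length : Int)
                 then "B" else "R"] := by
          intro ri hm
          have h1 : 1 ≤ ri := by have := List.mem_range'_1.mp hm; omega
          rw [pv_judge_pos cols gap ci ri h1, if_pos hc]
        rw [List.flatMap_congr hmap, ← List.map_eq_flatMap,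
          pv_tail_closed ((cols.getD ci []).length - 1)
            ((PySem.List.pyGetD cols ((ci : Int) - gap) []).length : Int)]
        by_cases h2 : 1 < ((cols.getD ci []).length : Int)
        · rw [if_pos (⟨h2, hc⟩ : 1 < ((cols.getD ci []).length : Int) ∧ 0 ≤ (ci : Int) - gap)]
          rw [show (((cols.getD ci []).length - 1 : Nat) : Int)
               = ((cols.getD ci []).length : Int) - 1 by omega,
             show (((cols.getD ci []).length : Int) - 1).toNat
               = (cols.getD ci []).length - 1 by omega]
        · have hL1 : (cols.getD ci []).length = 1 := by omega
          have hn : ¬ (1 < ((cols.getD ci []).length : Int) ∧ 0 ≤ (ci : Int) - gap) := by omega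
          rw [if_neg hn, hL1]
          simp
      · have hn : ¬ (1 < ((cols.getD ci []).length : Int) ∧ 0 ≤ (ci : Int) - gap) := by omega
        rw [if_neg hn]
        apply List.flatMap_eq_nil_iff.mpr
        intro ri hm
        have h1 : 1 ≤ ri := by have := List.mem_range'_1.mp hm; omega
        rw [pv_judge_pos cols gap ci ri h1, if_neg hc]

-- B's sum over an Int range of columns is the Nat-range sum of A's column judgments
theorem pv_range_eq (cols : List (List Int)) (gap : Int) (hg : 0 ≤ gap) (a b : Nat) :
    (PySem.List.pyRange (a : Int) (b : Int) 1).flatMap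
        (pvColB (cols.map (fun c => (c.length : Int))) gap)
      = (List.range' a (b - a)).flatMap (fun (ci : Nat) =>
          (List.range (cols.getD ci []).length).flatMap
            (fun (ri : Nat) => pvJudgeA cols gap (ci : Int) (ri : Int))) := by
  rw [PySem.List.pyRange_one]
  have hba : ((b : Int) - (a : Int)).toNat = b - a := by omega
  rw [hba, List.flatMap_map]
  rw [show List.range' a (b - a) = (List.range (b - a)).map (a + ·) from List.range'_eq_map_range]
  rw [List.flatMap_map]
  apply List.flatMap_congr
  intro k _hk
  show pvColB (cols.map (fun c => (c.length : Int))) gap ((a : Int) + (k : Int)) = _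
  rw [show ((a : Int) + (k : Int)) = ((a + k : Nat) : Int) by push_cast; ring]
  exact (pv_col_eq cols gap hg (a + k)).symm

-- splitting the column range at the start column
theorem pv_range_split (a n : Nat) (h : a ≤ n) :
    List.range n = List.range' 0 a ++ List.range' a (n - a) := by
  have h2 := @List.range'_append 0 a (n - a) 1
  simp only [Nat.one_mul, Nat.zero_add] at h2
  rw [List.range_eq_range', show n = a + (n - a) by omega, ← h2]
  congr 2
  omega

theorem pv_range'_cons (s m : Nat) (h : 0 < m) :
    List.range' s m = s :: List.range' (s + 1) (m - 1) := by
  cases m with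
  | zero => omega
  | succ k => rw [List.range'_succ]; simp

-- once the start column triggers on its first non-skipped row, A's result is the
-- flat judgments of all columns from the start column on
theorem pv_A_result (cols : List (List Int)) (gap sci sri : Int) (sciN : Nat)
    (hlt : sciN < cols.length)
    (hskip : ∀ ci : Nat, ci < sciN → (ci : Int) ≠ sci)
    (hstart : (List.range (cols.getD sciN []).length).foldl
        (fun st (ri : Nat) => pvStepA cols gap sci sri st (sciN : Int) (ri : Int)) (false, [])
      = (true, (List.range (cols.getD sciN []).length).flatMap
          (fun (ri : Nat) => pvJudgeA cols gap (sciN : Int) (ri : Int)))) :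
    ((List.range cols.length).foldl
      (fun st ci => (List.range (cols.getD ci []).length).foldl
        (fun st (ri : Nat) => pvStepA cols gap sci sri st (ci : Int) (ri : Int)) st)
      (false, [])).2
    = (List.range' sciN (cols.length - sciN)).flatMap (fun (ci : Nat) =>
        (List.range (cols.getD ci []).length).flatMap
          (fun (ri : Nat) => pvJudgeA cols gap (ci : Int) (ri : Int))) := by
  rw [pv_range_split sciN cols.length (Nat.le_of_lt hlt), List.foldl_append]
  rw [pv_cols_skip cols gap sci sri _ []
    (fun ci hm he => absurd he (hskip ci (by have := List.mem_range'_1.mp hm; omega)))]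
  rw [pv_range'_cons sciN (cols.length - sciN) (by omega)]
  rw [List.foldl_cons, hstart, pv_cols_started, List.flatMap_cons]

-- if the start cell never materializes (its column is empty), A returns []
theorem pv_A_dead (cols : List (List Int)) (gap sci sri : Int)
    (h : ∀ ci : Nat, ci < cols.length → (ci : Int) = sci → (cols.getD ci []).length = 0) :
    ((List.range cols.length).foldl
      (fun st ci => (List.range (cols.getD ci []).length).foldl
        (fun st (ri : Nat) => pvStepA cols gap sci sri st (ci : Int) (ri : Int)) st)
      (false, [])).2 = [] := by
  rw [pv_cols_skip cols gap sci sri _ []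
    (fun ci hm he => h ci (List.mem_range.mp hm) he)]

-- ===== VERDICT (by name: the statement is the Claim_ definition above) =====
theorem derived_road_py_spec : Claim_equal_derived_road_py := by
  intro cols gap _hdom hg
  have hg' : (0 : Int) ≤ gap := hg
  unfold Spec_derived_road_py derived_road_py derived_road_py_alt
  simp only [pv_lens_getD, List.length_map]
  by_cases h1 : gap < (cols.length : Int) ∧ 2 ≤ ((PySem.List.pyGetD cols gap []).length : Int)
  · -- primary start: col gap, row 1
    rw [if_pos h1, if_pos h1]
    dsimp only
    have hgN : ((gap.toNat : Nat) : Int) = gap := Int.toNat_of_nonneg hg'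
    have hlt : gap.toNat < cols.length := by omega
    have hL2 : 2 ≤ (cols.getD gap.toNat []).length := by
      have h2 := h1.2
      rw [← hgN, PySem.List.pyGetD_natCast] at h2
      omega
    rw [PySem.List.foldl_append_eq_flatMap, List.nil_append, ← hgN]
    rw [pv_range_eq cols ((gap.toNat : Nat) : Int) (by omega) gap.toNat cols.length]
    apply pv_A_result cols ((gap.toNat : Nat) : Int) ((gap.toNat : Nat) : Int) 1 gap.toNat hlt
      (fun ci hci => by omega)
    obtain ⟨k, hk⟩ : ∃ k, (cols.getD gap.toNat []).length = k + 2 := ⟨(cols.getD gap.toNat []).length - 2, by omega⟩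
    rw [hk, show List.range (k + 2) = 0 :: 1 :: List.range' 2 k from by
      rw [List.range_eq_range', List.range'_succ, List.range'_succ]]
    rw [List.foldl_cons, List.foldl_cons]
    have s0 : pvStepA cols ((gap.toNat : Nat) : Int) ((gap.toNat : Nat) : Int) 1 (false, [])
        ((gap.toNat : Nat) : Int) ((0 : Nat) : Int) = (false, []) := by
      unfold pvStepA; simp
    have s1 : pvStepA cols ((gap.toNat : Nat) : Int) ((gap.toNat : Nat) : Int) 1 (false, [])
        ((gap.toNat : Nat) : Int) ((1 : Nat) : Int)
        = (true, [] ++ pvJudgeA cols ((gap.toNat : Nat) : Int) ((gap.toNat : Nat) : Int)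
            ((1 : Nat) : Int)) := by
      unfold pvStepA; simp
    have j0 : pvJudgeA cols ((gap.toNat : Nat) : Int) ((gap.toNat : Nat) : Int)
        ((0 : Nat) : Int) = [] := by
      unfold pvJudgeA
      simp
    rw [s0, s1, pv_rows_started]
    simp only [List.flatMap_cons, j0, List.nil_append]
  · rw [if_neg h1, if_neg h1]
    by_cases h2 : gap + 1 < (cols.length : Int)
    · -- fallback start: col gap+1, row 0
      rw [if_pos h2]
      have hfN : (((gap + 1).toNat : Nat) : Int) = gap + 1 := Int.toNat_of_nonneg (by omega)
      have hlt : (gap + 1).toNat < cols.length := by omega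
      by_cases h3 : 1 ≤ ((PySem.List.pyGetD cols (gap + 1) []).length : Int)
      · rw [if_pos ⟨h2, h3⟩]
        dsimp only
        have hL1 : 1 ≤ (cols.getD (gap + 1).toNat []).length := by
          have h4 := h3
          rw [← hfN, PySem.List.pyGetD_natCast] at h4
          omega
        rw [PySem.List.foldl_append_eq_flatMap, List.nil_append, ← hfN]
        rw [pv_range_eq cols gap hg (gap + 1).toNat cols.length]
        apply pv_A_result cols gap (((gap + 1).toNat : Nat) : Int) 0 (gap + 1).toNat hlt
          (fun ci hci => by omega)
        obtain ⟨k, hk⟩ : ∃ k, (cols.getD (gap + 1).toNat []).length = k + 1 := ⟨(cols.getD (gap + 1).toNat []).length - 1, by omega⟩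
        rw [hk, show List.range (k + 1) = 0 :: List.range' 1 k from by
          rw [List.range_eq_range', List.range'_succ]]
        rw [List.foldl_cons]
        have s0 : pvStepA cols gap (((gap + 1).toNat : Nat) : Int) 0 (false, [])
            (((gap + 1).toNat : Nat) : Int) ((0 : Nat) : Int)
            = (true, [] ++ pvJudgeA cols gap (((gap + 1).toNat : Nat) : Int)
                ((0 : Nat) : Int)) := by
          unfold pvStepA; simp
        rw [s0, pv_rows_started]
        simp only [List.flatMap_cons, List.nil_append]
      · rw [if_neg (fun hand => h3 hand.2)]
        dsimp only
        exact pv_A_dead cols gap (gap + 1) 0 (fun ci hci he => by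
          have : ci = (gap + 1).toNat := by omega
          subst this
          have h4 : ¬ 1 ≤ ((cols.getD (gap + 1).toNat []).length : Int) := by
            rw [← PySem.List.pyGetD_natCast (xs := cols) (d := ([] : List Int)), hfN]
            exact h3
          omega)
    · rw [if_neg h2, if_neg (fun hand => h2 hand.1)]
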